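-- pv_equiv track=rewrite | github.com/baekhangyeol/CodingTest_Practice | 프로그래머스/1/42840. 모의고사/모의고사.py | solution
-- ===== SOURCE A (Python) =====
-- def solution(answers):
--     drop_math1 = [1, 2, 3, 4, 5]
--     drop_math2 = [2, 1, 2, 3, 2, 4, 2, 5]
--     drop_math3 = [3, 3, 1, 1, 2, 2, 4, 4, 5, 5]
--
--     result1, result2, result3 = 0, 0, 0
--
--     answer = []
--
--     for i in range(len(answers)):
--         if drop_math1[i % len(drop_math1)] == answers[i]:
--             result1 += 1
--         if drop_math2[i % len(drop_math2)] == answers[i]: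
--             result2 += 1
--         if drop_math3[i % len(drop_math3)] == answers[i]:
--             result3 += 1
--
--     max_score = max(result1, result2, result3)
--
--     if result1 == max_score:
--         answer.append(1)
--     if result2 == max_score:
--         answer.append(2)
--     if result3 == max_score:
--         answer.append(3)
--
--     return answer
-- ===== SOURCE B (Python) =====
-- def solution(answers):
--     patterns = [[1, 2, 3, 4, 5],
--                 [2, 1, 2, 3, 2, 4, 2, 5],
--                 [3, 3, 1, 1, 2, 2, 4, 4, 5, 5]]
--     # All three patterns repeat with period dividing 40 (= lcm(5, 8, 10)), so one
--     # histogram keyed by (index mod 40, answer) determines every score: build it in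
--     # a single pass, then score each pattern by 40 table lookups instead of
--     # comparing it against every answer.
--     hist = {}
--     for i, a in enumerate(answers):
--         key = (i % 40, a)
--         hist[key] = hist.get(key, 0) + 1
--     scores = [sum(hist.get((j, p[j % len(p)]), 0) for j in range(40))
--               for p in patterns]
--     m = max(scores)
--     return [k + 1 for k, s in enumerate(scores) if s == m]
-- ===== Notes on version B (the rewrite author's own statement) =====
-- stated objective: alternative
-- what changed: Instead of comparing every answer against the three patterns (three counters updated per element), B builds a histogram keyed by (index mod 40, answer) in one pass and scores each pattern by 40 histogram lookups, exploiting that every pattern's period divides lcm(5,8,10)=40.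
import Mathlib
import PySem

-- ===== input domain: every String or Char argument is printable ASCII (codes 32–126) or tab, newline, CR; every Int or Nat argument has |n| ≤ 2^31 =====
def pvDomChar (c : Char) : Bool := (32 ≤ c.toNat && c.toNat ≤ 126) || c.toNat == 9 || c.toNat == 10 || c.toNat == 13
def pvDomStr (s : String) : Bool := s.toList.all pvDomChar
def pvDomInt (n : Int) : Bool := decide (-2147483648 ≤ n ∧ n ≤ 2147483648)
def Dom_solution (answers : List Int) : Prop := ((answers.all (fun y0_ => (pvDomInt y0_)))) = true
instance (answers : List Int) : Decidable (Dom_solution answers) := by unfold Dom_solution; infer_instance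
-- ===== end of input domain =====

-- B replaces A's per-element comparison against the three patterns by a histogram keyed by
-- (index mod 40, answer) built in one pass, scoring each pattern by 40 table lookups
-- (every pattern's period divides lcm(5,8,10) = 40); same O(n) cost, different algorithm.

-- ===== PORT A =====
-- literal port of A: one interleaved loop over the indices, three counters, then appends
def solution (answers : List Int) : List Int :=
  let dm1 : List Int := [1, 2, 3, 4, 5]
  let dm2 : List Int := [2, 1, 2, 3, 2, 4, 2, 5]
  let dm3 : List Int := [3, 3, 1, 1, 2, 2, 4, 4, 5, 5]
  let r : Int × Int × Int :=
    (PySem.List.pyRange 0 (PySem.List.len answers) 1).foldl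
      (fun r i =>
        ((if PySem.List.pyGetD dm1 (PySem.Int.mod i (PySem.List.len dm1)) 0 = PySem.List.pyGetD answers i 0 then r.1 + 1 else r.1),
         (if PySem.List.pyGetD dm2 (PySem.Int.mod i (PySem.List.len dm2)) 0 = PySem.List.pyGetD answers i 0 then r.2.1 + 1 else r.2.1),
         (if PySem.List.pyGetD dm3 (PySem.Int.mod i (PySem.List.len dm3)) 0 = PySem.List.pyGetD answers i 0 then r.2.2 + 1 else r.2.2)))
      (0, 0, 0)
  let maxScore : Int := max r.1 (max r.2.1 r.2.2)
  ((if r.1 = maxScore then [1] else []) ++ (if r.2.1 = maxScore then [2] else [])) ++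
    (if r.2.2 = maxScore then [3] else [])

-- ===== PORT B =====
-- hist[key] = hist.get(key, 0) + 1  is Dict.modify key 0 (· + 1); hist.get((j, …), 0) is Dict.getD
def solution_alt (answers : List Int) : List Int :=
  let patterns : List (List Int) :=
    [[1, 2, 3, 4, 5], [2, 1, 2, 3, 2, 4, 2, 5], [3, 3, 1, 1, 2, 2, 4, 4, 5, 5]]
  let hist : PySem.Dict (Int × Int) Int :=
    (PySem.List.enumerate answers 0).foldl
      (fun d ia => d.modify (PySem.Int.mod ia.1 40, ia.2) 0 (· + 1)) PySem.Dict.empty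
  let scores : List Int := patterns.map (fun p =>
    ((PySem.List.pyRange 0 40 1).map (fun j =>
        hist.getD (j, PySem.List.pyGetD p (PySem.Int.mod j (PySem.List.len p)) 0) 0)).sum)
  let m : Int := PySem.List.maxD scores (fun x => x) 0
  (PySem.List.enumerate scores 0).filterMap (fun ks => if ks.2 = m then some (ks.1 + 1) else none)

-- ===== PRECONDITION & SPEC =====
def Spec_solution (answers : List Int) (out : List Int) : Prop := out = solution_alt answers
instance (answers : List Int) (out : List Int) : Decidable (Spec_solution answers out) := by unfold Spec_solution; infer_instance

-- ===== CLAIM (what is proved, stated in full; the proofs are below) =====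
def Claim_equal_solution : Prop := ∀ (answers : List Int), Dom_solution answers → Spec_solution answers (solution answers)

-- ===== LEMMAS AND PROOFS =====

-- A's interleaved triple fold splits into three independent folds.
theorem pv_fold_triple {α : Type} (l : List α) (f g h : α → Prop)
    [DecidablePred f] [DecidablePred g] [DecidablePred h] (a b c : Int) :
    l.foldl
      (fun (r : Int × Int × Int) x =>
        ((if f x then r.1 + 1 else r.1),
         (if g x then r.2.1 + 1 else r.2.1),
         (if h x then r.2.2 + 1 else r.2.2))) (a, b, c)
      = (l.foldl (fun r x => if f x then r + 1 else r) a,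
         l.foldl (fun r x => if g x then r + 1 else r) b,
         l.foldl (fun r x => if h x then r + 1 else r) c) := by
  induction l generalizing a b c with
  | nil => rfl
  | cons x xs ih => simp only [List.foldl_cons]; exact ih _ _ _

-- over a duplicate-free index list, the 0/1 indicator of pair membership sums to one hit at most
theorem pv_sum_indicator (ns : List Int) (g : Int → Int) (x : Int × Int) (hnd : ns.Nodup) :
    (ns.map (fun j => if x = (j, g j) then (1 : Int) else 0)).sum
      = if x.1 ∈ ns ∧ x.2 = g x.1 then 1 else 0 := by
  induction ns with
  | nil => simp
  | cons j ns ih =>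
    have hnd' : ns.Nodup := hnd.of_cons
    have hjn : j ∉ ns := (List.nodup_cons.mp hnd).1
    simp only [List.map_cons, List.sum_cons, ih hnd']
    by_cases hx : x = (j, g j)
    · subst hx
      simp [hjn]
    · have : ¬ (x.1 = j ∧ x.2 = g x.1) := by
        rintro ⟨h1, h2⟩
        exact hx (Prod.ext h1 (by rw [h2, h1]))
      by_cases hm : x.1 ∈ ns ∧ x.2 = g x.1
      · simp [hx, hm, List.mem_cons]
      · have : ¬ ((x.1 = j ∨ x.1 ∈ ns) ∧ x.2 = g x.1) := by
          rintro ⟨h1 | h1, h2⟩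
          · exact this ⟨h1, h2⟩
          · exact hm ⟨h1, h2⟩
        simp only [hx, if_false, List.mem_cons]
        rw [if_neg hm, if_neg this]
        simp

-- summing the histogram's counts along the diagonal (j, g j) is one countP over the data
theorem pv_sum_count (ns : List Int) (g : Int → Int) (hnd : ns.Nodup) (l : List (Int × Int)) :
    (ns.map (fun j => ((l.count (j, g j) : Int)))).sum
      = ((l.countP (fun x => decide (x.1 ∈ ns ∧ x.2 = g x.1)) : Int)) := by
  induction l with
  | nil => simp
  | cons x l ih =>
    have hc : (fun j => ((List.count (j, g j) (x :: l) : Int)))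
        = fun j => ((List.count (j, g j) l : Int)) + (if x = (j, g j) then (1 : Int) else 0) := by
      funext j
      rw [List.count_cons]
      by_cases h : x = (j, g j) <;> simp [h, beq_iff_eq]
    rw [hc, PySem.List.sum_map_add_int, ih, pv_sum_indicator ns g x hnd, List.countP_cons]
    by_cases h : x.1 ∈ ns ∧ x.2 = g x.1 <;> simp [h]

-- Python's i % b % c = i % c when c divides b (positive moduli)
theorem pv_mod_mod (i L : Int) (hL : 0 < L) (hdvd : L ∣ 40) :
    PySem.Int.mod (PySem.Int.mod i 40) L = PySem.Int.mod i L := by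
  rw [PySem.Int.mod_eq_emod_of_pos hL, PySem.Int.mod_eq_emod_of_pos hL,
      PySem.Int.mod_eq_emod_of_pos (by norm_num : (0:Int) < 40),
      Int.emod_emod_of_dvd _ hdvd]

-- B's per-pattern score (40 histogram lookups) counts exactly the matches of p against the data
theorem pv_getD_fold (l : List (Int × Int)) (d : PySem.Dict (Int × Int) Int) (v : Int × Int) :
    (l.foldl (fun d ia => d.modify (PySem.Int.mod ia.1 40, ia.2) 0 (· + 1)) d).getD v 0
      = d.getD v 0 + (((l.map (fun ia => ((PySem.Int.mod ia.1 40, ia.2) : Int × Int))).count v : Int)) := by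
  induction l generalizing d with
  | nil => simp
  | cons x l ih =>
    simp only [List.foldl_cons, ih, List.map_cons]
    rw [PySem.Dict.getD_modify, List.count_cons]
    by_cases h : v = (PySem.Int.mod x.1 40, x.2)
    · rw [if_pos h, if_pos (beq_iff_eq.mpr h.symm), h]
      push_cast
      ring
    · rw [if_neg h, if_neg (by simp only [beq_iff_eq]; exact fun hv => h hv.symm)]
      push_cast
      ring

-- B's per-pattern score (40 histogram lookups) counts exactly the matches of p against the data
theorem pv_score_eq (p : List Int) (answers : List Int) (hL : 0 < PySem.List.len p)
    (hdvd : PySem.List.len p ∣ 40) :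
    ((PySem.List.pyRange 0 40 1).map (fun j =>
        (((PySem.List.enumerate answers 0).foldl
            (fun d ia => d.modify (PySem.Int.mod ia.1 40, ia.2) 0 (· + 1))
            PySem.Dict.empty).getD
          (j, PySem.List.pyGetD p (PySem.Int.mod j (PySem.List.len p)) 0) 0))).sum
      = (((PySem.List.enumerate answers 0).countP
          (fun ia => decide (PySem.List.pyGetD p (PySem.Int.mod ia.1 (PySem.List.len p)) 0 = ia.2)) : Int)) := by
  simp only [pv_getD_fold, PySem.Dict.getD_empty, zero_add]
  rw [pv_sum_count (PySem.List.pyRange 0 40 1)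
        (fun j => PySem.List.pyGetD p (PySem.Int.mod j (PySem.List.len p)) 0)
        (PySem.List.nodup_pyRange_one 0 40), List.countP_map]
  congr 1
  refine List.countP_congr fun ia hia => ?_
  obtain ⟨k, hk, rfl⟩ := (PySem.List.mem_enumerate_iff answers 0 ia).mp hia
  have hmem : PySem.Int.mod (0 + (k : Int)) 40 ∈ PySem.List.pyRange 0 40 1 :=
    PySem.List.mem_pyRange_one.mpr
      ⟨PySem.Int.mod_nonneg _ (by norm_num), PySem.Int.mod_lt _ (by norm_num)⟩
  have hmm := pv_mod_mod (0 + (k : Int)) (PySem.List.len p) hL hdvd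
  simp only [Function.comp_apply, decide_eq_true_eq]
  rw [hmm]
  exact ⟨fun h => h.2.symm, fun h => ⟨hmem, h.symm⟩⟩

theorem pv_maxD_three (a b c : Int) :
    PySem.List.maxD [a, b, c] (fun x => x) 0 = max a (max b c) := by
  simp only [PySem.List.maxD, PySem.List.max?]
  by_cases h1 : a < b <;> by_cases h2 : b < c <;> by_cases h3 : a < c <;>
    simp [h1, h2, h3] <;> omega

theorem solution_spec_aux : ∀ (answers : List Int), solution answers = solution_alt answers := by
  intro answers
  -- A's index loop reads (i, answers[i]) exactly as enumerate does
  have hA : (PySem.List.pyRange 0 (PySem.List.len answers) 1).foldl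
      (fun (r : Int × Int × Int) i =>
        ((if PySem.List.pyGetD ([1, 2, 3, 4, 5] : List Int) (PySem.Int.mod i (PySem.List.len ([1, 2, 3, 4, 5] : List Int))) 0 = PySem.List.pyGetD answers i 0 then r.1 + 1 else r.1),
         (if PySem.List.pyGetD ([2, 1, 2, 3, 2, 4, 2, 5] : List Int) (PySem.Int.mod i (PySem.List.len ([2, 1, 2, 3, 2, 4, 2, 5] : List Int))) 0 = PySem.List.pyGetD answers i 0 then r.2.1 + 1 else r.2.1),
         (if PySem.List.pyGetD ([3, 3, 1, 1, 2, 2, 4, 4, 5, 5] : List Int) (PySem.Int.mod i (PySem.List.len ([3, 3, 1, 1, 2, 2, 4, 4, 5, 5] : List Int))) 0 = PySem.List.pyGetD answers i 0 then r.2.2 + 1 else r.2.2)))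
      ((0 : Int), (0 : Int), (0 : Int))
      = (PySem.List.enumerate answers 0).foldl
        (fun (r : Int × Int × Int) (ia : Int × Int) =>
          ((if PySem.List.pyGetD ([1, 2, 3, 4, 5] : List Int) (PySem.Int.mod ia.1 (PySem.List.len ([1, 2, 3, 4, 5] : List Int))) 0 = ia.2 then r.1 + 1 else r.1),
           (if PySem.List.pyGetD ([2, 1, 2, 3, 2, 4, 2, 5] : List Int) (PySem.Int.mod ia.1 (PySem.List.len ([2, 1, 2, 3, 2, 4, 2, 5] : List Int))) 0 = ia.2 then r.2.1 + 1 else r.2.1),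
           (if PySem.List.pyGetD ([3, 3, 1, 1, 2, 2, 4, 4, 5, 5] : List Int) (PySem.Int.mod ia.1 (PySem.List.len ([3, 3, 1, 1, 2, 2, 4, 4, 5, 5] : List Int))) 0 = ia.2 then r.2.2 + 1 else r.2.2)))
        ((0 : Int), (0 : Int), (0 : Int)) := by
    rw [PySem.List.enumerate_eq_map_pyRange (xs := answers) (d := 0), List.foldl_map]
  unfold solution solution_alt
  simp only [hA, pv_fold_triple, PySem.List.foldl_ite_add_one, List.map_cons, List.map_nil,
    pv_score_eq ([1, 2, 3, 4, 5] : List Int) answers (by norm_num [PySem.List.len]) (by norm_num [PySem.List.len]),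
    pv_score_eq ([2, 1, 2, 3, 2, 4, 2, 5] : List Int) answers (by norm_num [PySem.List.len]) (by norm_num [PySem.List.len]),
    pv_score_eq ([3, 3, 1, 1, 2, 2, 4, 4, 5, 5] : List Int) answers (by norm_num [PySem.List.len]) (by norm_num [PySem.List.len]),
    zero_add, pv_maxD_three]
  generalize ((PySem.List.enumerate answers 0).countP
    (fun ia => decide (PySem.List.pyGetD ([1, 2, 3, 4, 5] : List Int) (PySem.Int.mod ia.1 (PySem.List.len ([1, 2, 3, 4, 5] : List Int))) 0 = ia.2)) : Int) = s1
  generalize ((PySem.List.enumerate answers 0).countP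
    (fun ia => decide (PySem.List.pyGetD ([2, 1, 2, 3, 2, 4, 2, 5] : List Int) (PySem.Int.mod ia.1 (PySem.List.len ([2, 1, 2, 3, 2, 4, 2, 5] : List Int))) 0 = ia.2)) : Int) = s2
  generalize ((PySem.List.enumerate answers 0).countP
    (fun ia => decide (PySem.List.pyGetD ([3, 3, 1, 1, 2, 2, 4, 4, 5, 5] : List Int) (PySem.Int.mod ia.1 (PySem.List.len ([3, 3, 1, 1, 2, 2, 4, 4, 5, 5] : List Int))) 0 = ia.2)) : Int) = s3
  simp [PySem.List.enumerate, List.filterMap]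
  split_ifs <;> simp

-- ===== VERDICT (by name: the statement is the Claim_ definition above) =====
theorem solution_spec : Claim_equal_solution := by
  intro answers _
  unfold Spec_solution
  exact solution_spec_aux answers
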